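-- pv_equiv track=rewrite | github.com/aicell-lab/imagej.js | tools/check_discipline.py | strip_metadata
-- ===== SOURCE A (Python) =====
-- def strip_metadata(body: str) -> str:
--     """Strip the leading italicised metadata paragraph from a Drafted-prose block.
--
--     The metadata paragraph opens with `*` and gives the version rationale; it
--     often names tokens in a rephrasing sense that is not a scientific claim.
--     The linter diffs only the prose that follows it.
--     """
--     lines = body.splitlines()
--     out: list[str] = []
--     in_metadata = False
--     metadata_done = False
--     for line in lines:
--         stripped = line.strip()
--         if not metadata_done:
--             if not in_metadata and stripped.startswith("*") and not stripped.startswith("**"):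
--                 in_metadata = True
--                 if stripped.endswith("*") and len(stripped) > 1:
--                     in_metadata = False
--                     metadata_done = True
--                 continue
--             if in_metadata:
--                 if stripped.endswith("*"):
--                     in_metadata = False
--                     metadata_done = True
--                 continue
--             if stripped == "":
--                 continue
--             metadata_done = True
--         out.append(line)
--     return "\n".join(out)
-- ===== SOURCE B (Python) =====
-- def strip_metadata(body: str) -> str:
--     """Find the boundary index past the leading italic metadata paragraph,
--     then slice the original lines once."""
--     lines = body.splitlines()
--     n = len(lines)
--     i = 0
--     while i < n and lines[i].strip() == "":
--         i += 1
--     if i < n: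
--         first = lines[i].strip()
--         if first.startswith("*") and not first.startswith("**"):
--             if first.endswith("*") and len(first) > 1:
--                 i += 1
--             else:
--                 i += 1
--                 while i < n and not lines[i].strip().endswith("*"):
--                     i += 1
--                 if i < n:
--                     i += 1
--     return "\n".join(lines[i:])
-- ===== Notes on version B (the rewrite author's own statement) =====
-- stated objective: simpler
-- what changed: Replaced A's two-flag (in_metadata/metadata_done) incremental state machine that accumulates an output list with a boundary computation: skip leading blanks, detect and consume the italic metadata paragraph to get one start index, then join a single slice of the original lines.
import Mathlib
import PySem

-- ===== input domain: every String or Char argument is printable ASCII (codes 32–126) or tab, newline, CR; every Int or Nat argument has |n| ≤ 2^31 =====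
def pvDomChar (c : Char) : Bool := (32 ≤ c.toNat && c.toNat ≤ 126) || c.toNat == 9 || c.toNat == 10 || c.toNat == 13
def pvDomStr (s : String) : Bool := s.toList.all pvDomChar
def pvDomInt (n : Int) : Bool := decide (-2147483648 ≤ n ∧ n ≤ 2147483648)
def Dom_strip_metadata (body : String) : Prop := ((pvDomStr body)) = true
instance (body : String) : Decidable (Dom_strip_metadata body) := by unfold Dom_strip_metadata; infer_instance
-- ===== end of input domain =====

-- B replaces A's two-flag incremental state machine by computing a single boundary
-- index (skip blanks, detect/consume the italic paragraph) and slicing once: simpler decomposition, same cost.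

-- ===== PORT A =====
-- A's loop over lines with state (in_metadata, metadata_done), accumulating out.
def stripLoopA : List String → Bool → Bool → List String
  | [], _, _ => []
  | line :: ls, inm, done =>
    let stripped := PySem.Str.strip line
    if !done then
      if !inm && PySem.Str.startswith stripped "*" && !PySem.Str.startswith stripped "**" then
        if PySem.Str.endswith stripped "*" && decide (1 < PySem.Str.len stripped) then
          stripLoopA ls false true
        else
          stripLoopA ls true false
      else if inm then
        (if PySem.Str.endswith stripped "*" then stripLoopA ls false true
         else stripLoopA ls true false)
      else if stripped = "" then
        stripLoopA ls inm done
      else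
        line :: stripLoopA ls inm true
    else
      line :: stripLoopA ls inm done

def strip_metadata (body : String) : String :=
  PySem.Str.join "\n" (stripLoopA (PySem.Str.splitlines body) false false)

-- ===== PORT B =====
-- while i < n and lines[i].strip() == "": i += 1
def bSkipBlank (lines : List String) (i : Nat) : Nat :=
  if h : i < lines.length then
    if PySem.Str.strip lines[i] = "" then bSkipBlank lines (i + 1) else i
  else i
termination_by lines.length - i

-- while i < n and not lines[i].strip().endswith("*"): i += 1
def bScanClose (lines : List String) (i : Nat) : Nat :=
  if h : i < lines.length then
    if !PySem.Str.endswith (PySem.Str.strip lines[i]) "*" then bScanClose lines (i + 1) else i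
  else i
termination_by lines.length - i

-- the boundary index just past the metadata paragraph, starting the blank-skip at i
def bStartFrom (lines : List String) (i : Nat) : Nat :=
  let k := bSkipBlank lines i
  if h : k < lines.length then
    let first := PySem.Str.strip lines[k]
    if PySem.Str.startswith first "*" && !PySem.Str.startswith first "**" then
      if PySem.Str.endswith first "*" && decide (1 < PySem.Str.len first) then k + 1
      else
        let j := bScanClose lines (k + 1)
        if j < lines.length then j + 1 else j
    else k
  else k

def strip_metadata_alt (body : String) : String :=
  let lines := PySem.Str.splitlines body
  PySem.Str.join "\n" (PySem.List.slice lines (some ((bStartFrom lines 0 : Nat) : Int)) none)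

-- ===== PRECONDITION & SPEC =====
def Spec_strip_metadata (body : String) (out : String) : Prop := out = strip_metadata_alt body
instance (body : String) (out : String) : Decidable (Spec_strip_metadata body out) := by unfold Spec_strip_metadata; infer_instance

-- ===== CLAIM (what is proved, stated in full; the proofs are below) =====
def Claim_equal_strip_metadata : Prop := ∀ (body : String), Dom_strip_metadata body → Spec_strip_metadata body (strip_metadata body)

-- ===== LEMMAS AND PROOFS =====

-- once metadata_done is set, A copies the rest verbatim
theorem stripLoopA_done (ls : List String) (b : Bool) : stripLoopA ls b true = ls := by
  induction ls with
  | nil => simp [stripLoopA]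
  | cons l ls ih => simp [stripLoopA, ih]

-- A's in-metadata scan equals B's close-scan boundary
theorem stripLoopA_scan (lines : List String) (i : Nat) :
    stripLoopA (lines.drop i) true false =
      lines.drop (if bScanClose lines i < lines.length then bScanClose lines i + 1 else bScanClose lines i) := by
  fun_induction bScanClose lines i with
  | case1 i h hcond ih =>
    have hc : PySem.Str.endswith (PySem.Str.strip lines[i]) "*" = false := by
      revert hcond; cases PySem.Str.endswith (PySem.Str.strip lines[i]) "*" <;> simp
    rw [List.drop_eq_getElem_cons h]
    simp only [stripLoopA, Bool.not_false, Bool.not_true, Bool.false_and, reduceIte, hc]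
    exact ih
  | case2 i h hcond =>
    have hc : PySem.Str.endswith (PySem.Str.strip lines[i]) "*" = true := by
      revert hcond; cases PySem.Str.endswith (PySem.Str.strip lines[i]) "*" <;> simp
    rw [List.drop_eq_getElem_cons h]
    simp only [stripLoopA, Bool.not_false, Bool.not_true, Bool.false_and, reduceIte, hc]
    rw [stripLoopA_done, if_pos h]
    simp
  | case3 i h =>
    have hle : lines.length ≤ i := Nat.le_of_not_lt h
    rw [if_neg h, List.drop_of_length_le hle]
    simp [stripLoopA]

-- main invariant: A's loop from index i equals dropping to B's boundary from i
theorem stripLoopA_main (lines : List String) (i : Nat) :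
    stripLoopA (lines.drop i) false false = lines.drop (bStartFrom lines i) := by
  fun_induction bSkipBlank lines i with
  | case1 i h hblank ih =>
    rw [List.drop_eq_getElem_cons h]
    simp only [stripLoopA, Bool.not_false, Bool.true_and, reduceIte]
    have hsw : PySem.Str.startswith (PySem.Str.strip lines[i]) "*" = false := by
      rw [hblank]; decide
    have hstep : bStartFrom lines i = bStartFrom lines (i + 1) := by
      unfold bStartFrom
      have : bSkipBlank lines i = bSkipBlank lines (i + 1) := by
        rw [bSkipBlank]; simp [h, hblank]
      rw [this]
    rw [hstep, if_neg (by rw [hsw]; simp), if_pos hblank]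
    exact ih
  | case2 i h hblank =>
    have hskip : bSkipBlank lines i = i := by rw [bSkipBlank]; simp [h, hblank]
    rw [List.drop_eq_getElem_cons h]
    simp only [stripLoopA, Bool.not_false, Bool.true_and, reduceIte]
    unfold bStartFrom
    rw [hskip, dif_pos h]
    by_cases hstar : (PySem.Str.startswith (PySem.Str.strip lines[i]) "*" &&
        !PySem.Str.startswith (PySem.Str.strip lines[i]) "**") = true
    · rw [if_pos hstar, if_pos hstar]
      by_cases hone : (PySem.Str.endswith (PySem.Str.strip lines[i]) "*" &&
          decide (1 < PySem.Str.len (PySem.Str.strip lines[i]))) = true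
      · rw [if_pos hone, if_pos hone, stripLoopA_done]
      · rw [if_neg hone, if_neg hone]
        exact stripLoopA_scan lines (i + 1)
    · rw [if_neg hstar, if_neg hstar, if_neg hblank, stripLoopA_done,
        ← List.drop_eq_getElem_cons h]
      simp
  | case3 i h =>
    have hle : lines.length ≤ i := Nat.le_of_not_lt h
    have hskip : bSkipBlank lines i = i := by rw [bSkipBlank]; simp [h]
    unfold bStartFrom
    rw [hskip, dif_neg h, List.drop_of_length_le hle]
    simp [stripLoopA]

-- ===== VERDICT (by name: the statement is the Claim_ definition above) =====
theorem strip_metadata_spec : Claim_equal_strip_metadata := by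
  intro body _
  have h := stripLoopA_main (PySem.Str.splitlines body) 0
  simp only [List.drop_zero] at h
  simp [Spec_strip_metadata, strip_metadata, strip_metadata_alt,
    PySem.List.slice_from_natCast, h]
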